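-- pv_equiv track=rewrite | github.com/kamerok/aoc | python/2024/solutions/day21.py | find_move_options
-- ===== SOURCE A (Python) =====
-- def find_move_options(current_symbol, next_symbol, positions):
--     position = positions[current_symbol]
--     required_position = positions[next_symbol]
--     row, col = position
--     v_diff = required_position[0] - row
--     h_diff = required_position[1] - col
--
--     result = []
--
--     moves_to_make = ['A']
--     if v_diff < 0:
--         for _ in range(abs(v_diff)):
--             moves_to_make.append('^')
--     elif v_diff > 0:
--         for _ in range(v_diff):
--             moves_to_make.append('v')
--     if h_diff < 0:
--         for _ in range(abs(h_diff)):
--             moves_to_make.append('<')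
--     elif h_diff > 0:
--         for _ in range(h_diff):
--             moves_to_make.append('>')
--
--     empty_position = positions[' ']
--     # if start in the same row, vertical first
--     if empty_position[0] == row and empty_position[1] == required_position[1]:
--         moves_to_make.sort(key=lambda k: 'v^<>A'.index(k))
--         result.append(''.join(moves_to_make))
--     # if start in the same col, horizontal first
--     elif empty_position[1] == col and empty_position[0] == required_position[0]:
--         moves_to_make.sort(key=lambda k: '<>v^A'.index(k))
--         result.append(''.join(moves_to_make))
--     else:
--         moves_to_make.sort(key=lambda k: 'v^<>A'.index(k))
--         result.append(''.join(moves_to_make))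
--         moves_to_make.sort(key=lambda k: '<>v^A'.index(k))
--         result.append(''.join(moves_to_make))
--
--     return result
-- ===== SOURCE B (Python) =====
-- def find_move_options(current_symbol, next_symbol, positions):
--     row, col = positions[current_symbol]
--     req_row, req_col = positions[next_symbol]
--     v_diff = req_row - row
--     h_diff = req_col - col
--     vertical = '^' * -v_diff if v_diff < 0 else 'v' * v_diff
--     horizontal = '<' * -h_diff if h_diff < 0 else '>' * h_diff
--     empty_row, empty_col = positions[' ']
--     if empty_row == row and empty_col == req_col:
--         return [vertical + horizontal + 'A']
--     if empty_col == col and empty_row == req_row: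
--         return [horizontal + vertical + 'A']
--     return [vertical + horizontal + 'A', horizontal + vertical + 'A']
-- ===== Notes on version B (the rewrite author's own statement) =====
-- stated objective: simpler
-- what changed: B builds the vertical and horizontal move runs directly as strings and concatenates them in the required order, instead of A's scheme of accumulating a flat move list and stable-sorting it (twice in the else branch) by index-in-a-key-string; the guard logic and the duplicate pair in the else branch are kept identical.
import Mathlib
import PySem

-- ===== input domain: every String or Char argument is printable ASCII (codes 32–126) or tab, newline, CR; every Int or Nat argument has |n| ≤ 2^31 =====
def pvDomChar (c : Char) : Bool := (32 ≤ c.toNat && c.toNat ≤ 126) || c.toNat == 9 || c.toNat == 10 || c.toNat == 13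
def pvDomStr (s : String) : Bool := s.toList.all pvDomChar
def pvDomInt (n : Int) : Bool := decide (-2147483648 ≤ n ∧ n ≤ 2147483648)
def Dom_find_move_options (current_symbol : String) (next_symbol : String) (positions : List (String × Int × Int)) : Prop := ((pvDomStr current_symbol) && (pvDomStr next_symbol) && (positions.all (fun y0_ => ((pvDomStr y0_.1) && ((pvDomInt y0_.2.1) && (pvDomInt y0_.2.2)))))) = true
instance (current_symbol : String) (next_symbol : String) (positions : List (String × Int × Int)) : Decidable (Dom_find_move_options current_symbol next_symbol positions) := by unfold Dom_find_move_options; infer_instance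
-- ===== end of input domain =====

-- B replaces A's build-a-flat-move-list-and-stable-sort-by-a-key-string scheme with direct
-- construction of the vertical and horizontal run strings and plain concatenation (simpler).

-- ===== PORT A =====
-- A's sort key lambdas 'v^<>A'.index(k) / '<>v^A'.index(k); ported with str.find, which is
-- exact here because every element of moves_to_make occurs in the key string.
def keyV (k : Char) : Int := PySem.Str.find "v^<>A" (String.mk [k])
def keyH (k : Char) : Int := PySem.Str.find "<>v^A" (String.mk [k])

def find_move_options (current_symbol : String) (next_symbol : String) (positions : List (String × Int × Int)) : List String :=
  let d := PySem.Dict.mk positions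
  match d.get? current_symbol with
  | none => []  -- Python raises KeyError; excluded by Pre_
  | some position =>
    match d.get? next_symbol with
    | none => []  -- KeyError; excluded by Pre_
    | some required_position =>
      let row := position.1
      let col := position.2
      let v_diff := required_position.1 - row
      let h_diff := required_position.2 - col
      let moves1 : List Char :=
        if v_diff < 0 then (PySem.List.pyRange 0 |v_diff| 1).foldl (fun acc _ => acc ++ ['^']) ['A']
        else if v_diff > 0 then (PySem.List.pyRange 0 v_diff 1).foldl (fun acc _ => acc ++ ['v']) ['A']
        else ['A']
      let moves2 : List Char :=
        if h_diff < 0 then (PySem.List.pyRange 0 |h_diff| 1).foldl (fun acc _ => acc ++ ['<']) moves1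
        else if h_diff > 0 then (PySem.List.pyRange 0 h_diff 1).foldl (fun acc _ => acc ++ ['>']) moves1
        else moves1
      match d.get? " " with
      | none => []  -- KeyError; excluded by Pre_
      | some empty_position =>
        if empty_position.1 = row ∧ empty_position.2 = required_position.2 then
          [String.mk (PySem.List.sorted moves2 keyV false)]
        else if empty_position.2 = col ∧ empty_position.1 = required_position.1 then
          [String.mk (PySem.List.sorted moves2 keyH false)]
        else
          let s1 := PySem.List.sorted moves2 keyV false
          let s2 := PySem.List.sorted s1 keyH false
          [String.mk s1, String.mk s2]

-- ===== PORT B =====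
def find_move_options_alt (current_symbol : String) (next_symbol : String) (positions : List (String × Int × Int)) : List String :=
  let d := PySem.Dict.mk positions
  match d.get? current_symbol, d.get? next_symbol, d.get? " " with
  | some p, some r, some e =>
    let v_diff := r.1 - p.1
    let h_diff := r.2 - p.2
    let vertical := if v_diff < 0 then List.replicate (-v_diff).toNat '^' else List.replicate v_diff.toNat 'v'
    let horizontal := if h_diff < 0 then List.replicate (-h_diff).toNat '<' else List.replicate h_diff.toNat '>'
    if e.1 = p.1 ∧ e.2 = r.2 then [String.mk (vertical ++ horizontal ++ ['A'])]
    else if e.2 = p.2 ∧ e.1 = r.1 then [String.mk (horizontal ++ vertical ++ ['A'])]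
    else [String.mk (vertical ++ horizontal ++ ['A']), String.mk (horizontal ++ vertical ++ ['A'])]
  | _, _, _ => []  -- KeyError; excluded by Pre_

-- ===== PRECONDITION & SPEC =====
-- Pre_: the three dict lookups (current_symbol, next_symbol, ' ') must succeed; on a missing key Python raises KeyError.
def Pre_find_move_options (current_symbol : String) (next_symbol : String) (positions : List (String × Int × Int)) : Prop :=
  current_symbol ∈ positions.map Prod.fst ∧ next_symbol ∈ positions.map Prod.fst ∧ " " ∈ positions.map Prod.fst
instance (current_symbol : String) (next_symbol : String) (positions : List (String × Int × Int)) : Decidable (Pre_find_move_options current_symbol next_symbol positions) := by unfold Pre_find_move_options; infer_instance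

def pvWitness_find_move_options : String × String × (List (String × Int × Int)) :=
  ("1", "9", [("1", 2, 0), ("9", 0, 2), (" ", 3, 0)])

def Spec_find_move_options (current_symbol : String) (next_symbol : String) (positions : List (String × Int × Int)) (out : List String) : Prop := out = find_move_options_alt current_symbol next_symbol positions
instance (current_symbol : String) (next_symbol : String) (positions : List (String × Int × Int)) (out : List String) : Decidable (Spec_find_move_options current_symbol next_symbol positions out) := by unfold Spec_find_move_options; infer_instance

-- ===== CLAIM (what is proved, stated in full; the proofs are below) =====
def Claim_equal_find_move_options : Prop := ∀ (current_symbol : String) (next_symbol : String) (positions : List (String × Int × Int)), Dom_find_move_options current_symbol next_symbol positions → Pre_find_move_options current_symbol next_symbol positions → Spec_find_move_options current_symbol next_symbol positions (find_move_options current_symbol next_symbol positions)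

-- ===== LEMMAS AND PROOFS =====

-- inserting past a prefix none of whose elements compare after x
lemma insertBy_append_left (before : Char → Char → Bool) (x : Char) (ys zs : List Char)
    (h : ∀ y ∈ ys, before x y = false) :
    PySem.List.insertBy before x (ys ++ zs) = ys ++ PySem.List.insertBy before x zs := by
  induction ys with
  | nil => simp
  | cons y ys ih =>
    have hy : before x y = false := h y (by simp)
    simp [PySem.List.insertBy, hy, ih (fun y hy => h y (by simp [hy]))]

-- folding n copies of x into pre ++ suf lands them between pre and suf
lemma foldl_ins (key : Char → Int) (x : Char) (n : Nat) (pre suf : List Char)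
    (hpre : ∀ y ∈ pre, ¬ key x < key y)
    (hs : PySem.List.insertBy (fun a b => decide (key a < key b)) x suf = x :: suf) :
    List.foldl (fun acc y => PySem.List.insertBy (fun a b => decide (key a < key b)) y acc)
      (pre ++ suf) (List.replicate n x) = pre ++ (List.replicate n x ++ suf) := by
  induction n generalizing pre with
  | zero => simp
  | succ n ih =>
    have hpre' : ∀ y ∈ pre ++ [x], ¬ key x < key y := by
      intro y hy
      rcases List.mem_append.1 hy with h | h
      · exact hpre y h
      · simp at h
        simp [h]
    rw [List.replicate_succ, List.foldl_cons,
      insertBy_append_left _ _ _ _ (fun y hy => by simpa using hpre y hy), hs,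
      show pre ++ x :: suf = (pre ++ [x]) ++ suf by simp, ih (pre ++ [x]) hpre']
    simp

lemma sort_up (key : Char → Int) (a b z : Char) (m n : Nat)
    (h1 : ¬ key b < key a) (h2 : key a < key z) (h3 : key b < key z) :
    PySem.List.sorted (z :: (List.replicate m a ++ List.replicate n b)) key false
      = List.replicate m a ++ (List.replicate n b ++ [z]) := by
  rw [PySem.List.sorted_eq_foldl_insertBy, List.foldl_cons, List.foldl_append]
  have s1 : PySem.List.insertBy (fun a b => decide (key a < key b)) z [] = [z] := rfl
  have f1 := foldl_ins key a m [] [z] (by simp) (by simp [PySem.List.insertBy, h2])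
  simp only [List.nil_append] at f1 s1 ⊢
  rw [s1, f1]
  have f2 := foldl_ins key b n (List.replicate m a) [z]
    (by intro y hy; rw [List.eq_of_mem_replicate hy]; exact h1)
    (by simp [PySem.List.insertBy, h3])
  rw [f2]

lemma sort_down (key : Char → Int) (a b z : Char) (m n : Nat)
    (h1 : key b < key a) (h2 : key a < key z) (h3 : key b < key z) :
    PySem.List.sorted (z :: (List.replicate m a ++ List.replicate n b)) key false
      = List.replicate n b ++ (List.replicate m a ++ [z]) := by
  rw [PySem.List.sorted_eq_foldl_insertBy, List.foldl_cons, List.foldl_append]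
  have s1 : PySem.List.insertBy (fun a b => decide (key a < key b)) z [] = [z] := rfl
  have f1 := foldl_ins key a m [] [z] (by simp) (by simp [PySem.List.insertBy, h2])
  simp only [List.nil_append] at f1 s1 ⊢
  rw [s1, f1]
  have f2 := foldl_ins key b n [] (List.replicate m a ++ [z]) (by simp)
    (by cases m with
        | zero => simp [PySem.List.insertBy, h3]
        | succ k => simp [List.replicate_succ, PySem.List.insertBy, h1])
  simpa using f2

lemma sort_swap (key : Char → Int) (a b z : Char) (m n : Nat)
    (h1 : key b < key a) (h2 : key a < key z) (h3 : key b < key z) :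
    PySem.List.sorted (List.replicate m a ++ (List.replicate n b ++ [z])) key false
      = List.replicate n b ++ (List.replicate m a ++ [z]) := by
  rw [PySem.List.sorted_eq_foldl_insertBy, List.foldl_append, List.foldl_append]
  have f1 := foldl_ins key a m [] [] (by simp) rfl
  simp only [List.nil_append, List.append_nil] at f1
  rw [f1]
  have f2 := foldl_ins key b n [] (List.replicate m a) (by simp)
    (by cases m with
        | zero => rfl
        | succ k => simp [List.replicate_succ, PySem.List.insertBy, h1])
  simp only [List.nil_append] at f2
  rw [f2, List.foldl_cons, List.foldl_nil]
  rw [PySem.List.insertBy_of_forall_not_before _ _ _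
    (by intro y hy
        rcases List.mem_append.1 hy with h | h
        · rw [List.eq_of_mem_replicate h]; simpa using (lt_asymm h3)
        · rw [List.eq_of_mem_replicate h]; simpa using (lt_asymm h2))]
  simp

-- A's vertical loop produces 'A' followed by B's vertical run
lemma vloop (v : Int) :
    (if v < 0 then (PySem.List.pyRange 0 |v| 1).foldl (fun acc _ => acc ++ ['^']) ['A']
     else if v > 0 then (PySem.List.pyRange 0 v 1).foldl (fun acc _ => acc ++ ['v']) ['A']
     else ['A'])
    = 'A' :: (if v < 0 then List.replicate (-v).toNat '^' else List.replicate v.toNat 'v') := by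
  split_ifs with hv hv'
  · rw [show (fun (acc : List Char) (_ : Int) => acc ++ ['^']) = fun acc x => acc ++ [(fun _ => '^') x] from rfl,
      PySem.List.foldl_append_singleton_eq_map, List.map_const', PySem.List.length_pyRange_one,
      abs_of_neg hv]
    simp
  · rw [show (fun (acc : List Char) (_ : Int) => acc ++ ['v']) = fun acc x => acc ++ [(fun _ => 'v') x] from rfl,
      PySem.List.foldl_append_singleton_eq_map, List.map_const', PySem.List.length_pyRange_one]
    simp
  · have : v.toNat = 0 := by omega
    simp [this]

-- A's horizontal loop appends B's horizontal run
lemma hloop (h : Int) (base : List Char) :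
    (if h < 0 then (PySem.List.pyRange 0 |h| 1).foldl (fun acc _ => acc ++ ['<']) base
     else if h > 0 then (PySem.List.pyRange 0 h 1).foldl (fun acc _ => acc ++ ['>']) base
     else base)
    = base ++ (if h < 0 then List.replicate (-h).toNat '<' else List.replicate h.toNat '>') := by
  split_ifs with hh hh'
  · rw [show (fun (acc : List Char) (_ : Int) => acc ++ ['<']) = fun acc x => acc ++ [(fun _ => '<') x] from rfl,
      PySem.List.foldl_append_singleton_eq_map, List.map_const', PySem.List.length_pyRange_one,
      abs_of_neg hh]
    simp
  · rw [show (fun (acc : List Char) (_ : Int) => acc ++ ['>']) = fun acc x => acc ++ [(fun _ => '>') x] from rfl,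
      PySem.List.foldl_append_singleton_eq_map, List.map_const', PySem.List.length_pyRange_one]
    simp
  · have : h.toNat = 0 := by omega
    simp [this]

-- sorting the move list by 'v^<>A'.index puts vertical run, horizontal run, 'A'
lemma sortV_eq (v h : Int) :
    PySem.List.sorted ('A' :: ((if v < 0 then List.replicate (-v).toNat '^' else List.replicate v.toNat 'v')
        ++ (if h < 0 then List.replicate (-h).toNat '<' else List.replicate h.toNat '>'))) keyV false
      = (if v < 0 then List.replicate (-v).toNat '^' else List.replicate v.toNat 'v')
        ++ ((if h < 0 then List.replicate (-h).toNat '<' else List.replicate h.toNat '>') ++ ['A']) := by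
  split_ifs <;> exact sort_up keyV _ _ 'A' _ _ (by decide) (by decide) (by decide)

-- sorting the move list by '<>v^A'.index puts horizontal run, vertical run, 'A'
lemma sortH_eq (v h : Int) :
    PySem.List.sorted ('A' :: ((if v < 0 then List.replicate (-v).toNat '^' else List.replicate v.toNat 'v')
        ++ (if h < 0 then List.replicate (-h).toNat '<' else List.replicate h.toNat '>'))) keyH false
      = (if h < 0 then List.replicate (-h).toNat '<' else List.replicate h.toNat '>')
        ++ ((if v < 0 then List.replicate (-v).toNat '^' else List.replicate v.toNat 'v') ++ ['A']) := by
  split_ifs <;> exact sort_down keyH _ _ 'A' _ _ (by decide) (by decide) (by decide)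

-- re-sorting the vertical-first string by '<>v^A'.index gives the horizontal-first string
lemma sortVH_eq (v h : Int) :
    PySem.List.sorted ((if v < 0 then List.replicate (-v).toNat '^' else List.replicate v.toNat 'v')
        ++ ((if h < 0 then List.replicate (-h).toNat '<' else List.replicate h.toNat '>') ++ ['A'])) keyH false
      = (if h < 0 then List.replicate (-h).toNat '<' else List.replicate h.toNat '>')
        ++ ((if v < 0 then List.replicate (-v).toNat '^' else List.replicate v.toNat 'v') ++ ['A']) := by
  split_ifs <;> exact sort_swap keyH _ _ 'A' _ _ (by decide) (by decide) (by decide)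

lemma lookup_some (s : String) (positions : List (String × Int × Int))
    (h : s ∈ positions.map Prod.fst) :
    ∃ p, (PySem.Dict.mk positions).get? s = some p := by
  cases hc : (PySem.Dict.mk positions).get? s with
  | none =>
    exact absurd ((PySem.Dict.get?_eq_none_iff_not_mem_keys _ _).1 hc)
      (by simpa [PySem.Dict.keys] using h)
  | some p => exact ⟨p, rfl⟩

-- ===== VERDICT (by name: the statement is the Claim_ definition above) =====
theorem find_move_options_spec : Claim_equal_find_move_options := by
  intro cur nxt positions _ hpre
  obtain ⟨h1, h2, h3⟩ := hpre
  obtain ⟨p, hp⟩ := lookup_some cur positions h1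
  obtain ⟨r, hr⟩ := lookup_some nxt positions h2
  obtain ⟨e, he⟩ := lookup_some " " positions h3
  unfold Spec_find_move_options find_move_options find_move_options_alt
  simp only [hp, hr, he]
  rw [hloop, vloop, List.cons_append]
  by_cases hc1 : e.1 = p.1 ∧ e.2 = r.2
  · rw [if_pos hc1, if_pos hc1, sortV_eq]
    simp [List.append_assoc]
  · rw [if_neg hc1, if_neg hc1]
    by_cases hc2 : e.2 = p.2 ∧ e.1 = r.1
    · rw [if_pos hc2, if_pos hc2, sortH_eq]
      simp [List.append_assoc]
    · rw [if_neg hc2, if_neg hc2, sortV_eq, sortVH_eq]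
      simp [List.append_assoc]
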